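-- pv_equiv track=rewrite | github.com/ymu0117/programming | cipher/utils.py | word2pattern
-- ===== SOURCE A (Python) =====
-- def verify_case(word, case_type):
--     if case_type == 'insensitive':
--         return word.lower()
--     elif case_type == 'sensitive':
--         return word
--     else:
--         raise ValueError('Case type is not defined.')
--
-- def word2pattern(word, case_type):
--     """Convert word to pattern.
--     For example, for word 'abandon', the pattern will
--     be '0.1.0.2.3.4.2'
--     Parameters
--     ----------
--     word: str
--     """
--     word = verify_case(word, case_type)
--     pattern = []
--     int_map = {}
--     i = 0
--     for w in word:
--         if w not in int_map:
--             int_map[w] = str(i)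
--             i += 1
--         pattern.append(int_map[w])
--     return '.'.join(pattern)
-- ===== SOURCE B (Python) =====
-- def verify_case(word, case_type):
--     if case_type == 'insensitive':
--         return word.lower()
--     elif case_type == 'sensitive':
--         return word
--     else:
--         raise ValueError('Case type is not defined.')
--
-- def word2pattern(word, case_type):
--     word = verify_case(word, case_type)
--     return '.'.join(str(len(set(word[:word.index(c)]))) for c in word)
-- ===== Notes on version B (the rewrite author's own statement) =====
-- stated objective: alternative
-- what changed: B removes A's incremental dict/index machinery entirely: each character's digit is computed independently as len(set(word[:word.index(c)])), the count of distinct characters before its first occurrence, then the digits are joined.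
import Mathlib
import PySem

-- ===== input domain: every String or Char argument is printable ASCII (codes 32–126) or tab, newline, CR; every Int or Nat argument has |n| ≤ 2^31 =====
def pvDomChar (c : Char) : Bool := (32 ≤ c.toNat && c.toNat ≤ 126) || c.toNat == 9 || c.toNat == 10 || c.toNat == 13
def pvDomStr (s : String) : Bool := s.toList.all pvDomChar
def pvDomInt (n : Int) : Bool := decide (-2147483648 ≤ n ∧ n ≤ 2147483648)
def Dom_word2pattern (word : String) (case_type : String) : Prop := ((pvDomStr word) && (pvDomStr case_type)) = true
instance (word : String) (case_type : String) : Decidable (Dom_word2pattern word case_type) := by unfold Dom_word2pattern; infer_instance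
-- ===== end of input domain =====

-- B drops A's incremental map entirely: each character's digit is computed independently as the
-- number of distinct characters strictly before its first occurrence (alternative decomposition).

-- ===== PORT A =====
-- shared module helper verify_case: 'none' = the 'raise ValueError' branch (excluded by Pre_)
def pyVerifyCase (word : String) (case_type : String) : Option String :=
  if case_type == "insensitive" then some (PySem.Str.lower word)
  else if case_type == "sensitive" then some word
  else none

-- A's loop body: state = (pattern, int_map, i)
def pyStepA (s : List String × PySem.Dict Char String × Int) (c : Char) :
    List String × PySem.Dict Char String × Int :=
  let (pattern, int_map, i) := s
  if int_map.contains c then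
    (pattern ++ [int_map.getD c ""], int_map, i)
  else
    let int_map' := int_map.insert c (PySem.Int.toStr i)
    (pattern ++ [int_map'.getD c ""], int_map', i + 1)

def word2pattern (word : String) (case_type : String) : String :=
  match pyVerifyCase word case_type with
  | none => ""   -- Python raises ValueError here; these inputs are excluded by Pre_
  | some w =>
    let st := w.toList.foldl pyStepA ([], PySem.Dict.empty, 0)
    PySem.Str.join "." st.1

-- ===== PORT B =====
-- str(len(set(word[:word.index(c)]))) for each c of word; word.index(c) never raises
-- (c is drawn from word), so the .getD 0 default is never used
def word2pattern_alt (word : String) (case_type : String) : String :=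
  match pyVerifyCase word case_type with
  | none => ""   -- verify_case raises ValueError here; excluded by Pre_
  | some w =>
    PySem.Str.join "." (w.toList.map (fun c =>
      PySem.Int.toStr
        (((PySem.Set.ofList (w.toList.take ((PySem.List.index? w.toList c).getD 0))).length : Nat) : Int)))

-- ===== PRECONDITION & SPEC =====
-- Pre_ excludes exactly the case_type values on which verify_case (hence A) raises ValueError.
def Pre_word2pattern (_word : String) (case_type : String) : Prop :=
  case_type = "insensitive" ∨ case_type = "sensitive"
instance (word : String) (case_type : String) : Decidable (Pre_word2pattern word case_type) := by
  unfold Pre_word2pattern; infer_instance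

def pvWitness_word2pattern : String × String := ("abandon", "insensitive")

def Spec_word2pattern (word : String) (case_type : String) (out : String) : Prop := out = word2pattern_alt word case_type
instance (word : String) (case_type : String) (out : String) : Decidable (Spec_word2pattern word case_type out) := by unfold Spec_word2pattern; infer_instance

-- ===== CLAIM (what is proved, stated in full; the proofs are below) =====
def Claim_equal_word2pattern : Prop := ∀ (word : String) (case_type : String), Dom_word2pattern word case_type → Pre_word2pattern word case_type → Spec_word2pattern word case_type (word2pattern word case_type)

-- ===== LEMMAS AND PROOFS =====

-- the value both programs emit for a character: its index in the first-appearance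
-- order of the distinct characters of the whole word, rendered by str()
def pvIdxStr (order : List Char) (c : Char) : String :=
  PySem.Int.toStr (order.idxOf c : Int)

theorem pv_idx_update (s l : List Char) (c : Char) (h : c ∈ s) :
    pvIdxStr (PySem.Set.update s l) c = pvIdxStr s c := by
  rw [PySem.Set.update_eq_append_filter]
  simp [pvIdxStr, List.idxOf_append_of_mem h]

-- A's loop invariant: int_map maps every seen char to str(its index among the seen),
-- i = number of seen chars; the pattern extends by each char's index in the final order
theorem pv_loopA (rest seen : List Char) (m : PySem.Dict Char String) (pat : List String)
    (hnd : seen.Nodup) (hk : m.keys = seen)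
    (hv : ∀ c ∈ seen, m.getD c "" = pvIdxStr seen c) :
    (rest.foldl pyStepA (pat, m, (seen.length : Int))).1
      = pat ++ rest.map (fun c => pvIdxStr (PySem.Set.update seen rest) c) := by
  induction rest generalizing seen m pat with
  | nil => simp [PySem.Set.update_nil]
  | cons c rest' ih =>
    have hcont : m.contains c = true ↔ c ∈ seen := by
      rw [PySem.Dict.contains_iff_mem_keys, hk]
    by_cases hmem : c ∈ seen
    · have hstep : pyStepA (pat, m, (seen.length : Int)) c
          = (pat ++ [m.getD c ""], m, (seen.length : Int)) := by
        simp [pyStepA, hcont.mpr hmem]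
      rw [List.foldl_cons, hstep, ih seen m _ hnd hk hv]
      rw [PySem.Set.update_cons, PySem.Set.add_of_mem hmem]
      simp only [List.map_cons, List.append_assoc, List.singleton_append]
      rw [hv c hmem, pv_idx_update _ _ _ hmem]
    · have hnc : m.contains c = false := by
        cases h : m.contains c
        · rfl
        · exact absurd (hcont.mp h) hmem
      have hidxc : (seen ++ [c]).idxOf c = seen.length := by
        simp [List.idxOf_append, hmem]
      have hnd' : (seen ++ [c]).Nodup := by
        rw [List.nodup_append]
        exact ⟨hnd, List.nodup_singleton c, by simp; exact fun a ha h => hmem (h ▸ ha)⟩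
      have hk' : (m.insert c (PySem.Int.toStr (seen.length : Int))).keys = seen ++ [c] := by
        rw [PySem.Dict.keys_insert_of_not_contains m _ hnc, hk]
      have hv' : ∀ x ∈ seen ++ [c],
          (m.insert c (PySem.Int.toStr (seen.length : Int))).getD x "" = pvIdxStr (seen ++ [c]) x := by
        intro x hx
        by_cases hxc : x = c
        · subst hxc
          rw [PySem.Dict.getD_insert_self]
          simp [pvIdxStr, hidxc]
        · rw [PySem.Dict.getD_insert_of_ne m _ "" hxc]
          have hxs : x ∈ seen := by
            rcases List.mem_append.mp hx with h1 | h1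
            · exact h1
            · exact absurd (List.mem_singleton.mp h1) hxc
          rw [hv x hxs]
          simp [pvIdxStr, List.idxOf_append_of_mem hxs]
      have hstep : pyStepA (pat, m, (seen.length : Int)) c
          = (pat ++ [PySem.Int.toStr (seen.length : Int)],
             m.insert c (PySem.Int.toStr (seen.length : Int)),
             (((seen ++ [c]).length : Nat) : Int)) := by
        simp [pyStepA, hnc, PySem.Dict.getD_insert_self]
      rw [List.foldl_cons, hstep, ih (seen ++ [c]) _ _ hnd' hk' hv']
      rw [PySem.Set.update_cons, PySem.Set.add_of_not_mem hmem]
      simp only [List.map_cons, List.append_assoc, List.singleton_append]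
      congr 2
      rw [pv_idx_update _ _ _ (by simp : c ∈ seen ++ [c])]
      simp [pvIdxStr, hidxc]

-- B's per-character value: the number of distinct chars before the first occurrence of c
-- equals c's index in the first-appearance order of all of l
theorem pv_brute (l : List Char) (c : Char) (hc : c ∈ l) :
    PySem.Int.toStr
        (((PySem.Set.ofList (l.take ((PySem.List.index? l c).getD 0))).length : Nat) : Int)
      = pvIdxStr (PySem.Set.ofList l) c := by
  obtain ⟨k, hk⟩ := Option.isSome_iff_exists.mp ((PySem.List.index?_isSome_iff l c).mpr hc)
  obtain ⟨pre, suf, hl, hlen, hpre⟩ := (PySem.List.index?_eq_some_iff l c k).mp hk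
  have htake : l.take k = pre := by
    rw [hl, ← hlen, List.take_left]
  have hcpre : c ∉ PySem.Set.ofList pre := fun h => hpre ((PySem.Set.mem_ofList _ _).mp h)
  have hsplit : PySem.Set.ofList l
      = (PySem.Set.ofList pre ++ [c])
          ++ (PySem.Set.ofList suf).filter
              (fun y => !(PySem.Set.contains (PySem.Set.ofList pre ++ [c]) y)) := by
    rw [hl, PySem.Set.ofList_append, PySem.Set.update_cons,
      PySem.Set.add_of_not_mem hcpre, PySem.Set.update_eq_append_filter]
  rw [hk, Option.getD_some, htake, pvIdxStr, hsplit,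
    List.idxOf_append_of_mem (by simp : c ∈ PySem.Set.ofList pre ++ [c])]
  simp [List.idxOf_append, hcpre]

-- the two pipelines agree for any verified word w
theorem pv_core (w : String) :
    PySem.Str.join "." (w.toList.foldl pyStepA ([], PySem.Dict.empty, 0)).1
      = PySem.Str.join "." (w.toList.map (fun c =>
          PySem.Int.toStr
            (((PySem.Set.ofList (w.toList.take ((PySem.List.index? w.toList c).getD 0))).length : Nat) : Int))) := by
  congr 1
  have h0 : ((0 : Int)) = ((([] : List Char).length : Nat) : Int) := by simp
  rw [h0, pv_loopA w.toList [] PySem.Dict.empty [] List.nodup_nil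
    (by simp [PySem.Dict.keys_empty]) (by intro c hc; cases hc)]
  rw [List.nil_append, PySem.Set.update_nil_left]
  refine (List.map_congr_left ?_).symm
  intro c hc
  exact pv_brute _ c hc

-- ===== VERDICT (by name: the statement is the Claim_ definition above) =====
theorem word2pattern_spec : Claim_equal_word2pattern := by
  intro word case_type _ hpre
  unfold Spec_word2pattern word2pattern word2pattern_alt
  rcases hpre with h | h <;> subst h <;>
    simp only [pyVerifyCase, beq_self_eq_true, if_true, String.reduceBEq, if_false,
      Bool.false_eq_true] <;>
    exact pv_core _
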